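-- pv_equiv track=rewrite | github.com/thdft/qfin | src/qfin/indicators/common.py | revert_echo
-- ===== SOURCE A (Python) =====
-- def revert_echo(dataserie, empty_value=None):
--     """
--     i.e:  input  [0, -1, -1, -1, -1,  1,  1,  1,  1]
--           output [0, -1,  0,  0,  0,  1,  0,  0,  0]
--     """
--     prev = empty_value
--     arr = []
--     for x, value in dataserie.items():
--         if value == prev:
--             arr.append(empty_value)
--         else:
--             arr.append(value)
--
--         prev = value
--     return arr
-- ===== SOURCE B (Python) =====
-- def revert_echo(dataserie, empty_value=None):
--     # Run-length decomposition: find each maximal run of equal consecutive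
--     # values, emit its first value once, then (run length - 1) fillers.
--     vals = [v for _, v in dataserie.items()]
--     out = []
--     i, n = 0, len(vals)
--     while i < n:
--         v = vals[i]
--         j = i + 1
--         while j < n and vals[j] == v:
--             j += 1
--         out.append(v)
--         out.extend([empty_value] * (j - i - 1))
--         i = j
--     return out
-- ===== Notes on version B (the rewrite author's own statement) =====
-- stated objective: alternative
-- what changed: Replaces A's element-wise pass with a prev accumulator by a run-length decomposition: an outer loop finds each maximal run of equal consecutive values by scanning forward, emits the run's first value once followed by run_length-1 fillers, and jumps to the next run.
import Mathlib
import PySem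

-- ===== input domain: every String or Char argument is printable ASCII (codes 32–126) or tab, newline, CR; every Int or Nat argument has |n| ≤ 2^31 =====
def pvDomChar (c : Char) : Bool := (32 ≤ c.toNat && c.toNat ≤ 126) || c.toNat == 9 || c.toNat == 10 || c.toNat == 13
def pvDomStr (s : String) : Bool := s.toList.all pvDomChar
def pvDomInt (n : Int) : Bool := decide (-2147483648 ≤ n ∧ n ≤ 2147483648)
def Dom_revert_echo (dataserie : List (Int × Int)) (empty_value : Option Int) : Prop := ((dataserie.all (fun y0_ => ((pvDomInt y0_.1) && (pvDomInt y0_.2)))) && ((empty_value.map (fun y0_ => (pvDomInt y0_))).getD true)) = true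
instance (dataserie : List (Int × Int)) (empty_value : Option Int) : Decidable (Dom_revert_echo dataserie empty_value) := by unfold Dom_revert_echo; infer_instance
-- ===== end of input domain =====

-- ===== PORT A =====
-- B replaces A's element-wise prev-accumulator pass with a run-length decomposition
-- (scan each maximal run of equal values, emit head + fillers); alternative decomposition, same O(n).
-- A: prev = empty_value; for _, value in items: append(empty_value if value == prev else value); prev = value
def revert_echo (dataserie : List (Int × Int)) (empty_value : Option Int) : List (Option Int) :=
  (dataserie.foldl
    (fun (s : Option Int × List (Option Int)) xv =>
      (some xv.2, s.2 ++ [if some xv.2 = s.1 then empty_value else some xv.2]))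
    (empty_value, [])).2

-- ===== PORT B =====
-- B's outer loop over runs: take the head value v, scan forward while equal (k = inner-loop
-- advance, i.e. the length of the equal prefix of the rest), emit v then k fillers, drop the run.
def pvRunsB (empty_value : Option Int) : List Int → List (Option Int)
  | [] => []
  | v :: rest =>
      let k := (rest.takeWhile (fun w => w == v)).length
      some v :: (List.replicate k empty_value ++ pvRunsB empty_value (rest.drop k))
termination_by l => l.length
decreasing_by simp

-- B: vals = [v for _, v in items]; then emit run blocks as above
def revert_echo_alt (dataserie : List (Int × Int)) (empty_value : Option Int) : List (Option Int) :=
  pvRunsB empty_value (dataserie.map (fun xv => xv.2))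

-- ===== PRECONDITION & SPEC =====
def Spec_revert_echo (dataserie : List (Int × Int)) (empty_value : Option Int) (out : List (Option Int)) : Prop := out = revert_echo_alt dataserie empty_value
instance (dataserie : List (Int × Int)) (empty_value : Option Int) (out : List (Option Int)) : Decidable (Spec_revert_echo dataserie empty_value out) := by unfold Spec_revert_echo; infer_instance

-- ===== CLAIM (what is proved, stated in full; the proofs are below) =====
def Claim_equal_revert_echo : Prop := ∀ (dataserie : List (Int × Int)) (empty_value : Option Int), Dom_revert_echo dataserie empty_value → Spec_revert_echo dataserie empty_value (revert_echo dataserie empty_value)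

-- ===== LEMMAS AND PROOFS =====

-- A's loop, restricted to the value components, from a known previous value p
def pvGoA (e : Option Int) (p : Option Int) : List Int → List (Option Int)
  | [] => []
  | v :: rest => (if some v = p then e else some v) :: pvGoA e (some v) rest

theorem foldlA_eq_goA (e : Option Int) (l : List (Int × Int)) (p : Option Int)
    (acc : List (Option Int)) :
    (l.foldl
      (fun (s : Option Int × List (Option Int)) xv =>
        (some xv.2, s.2 ++ [if some xv.2 = s.1 then e else some xv.2]))
      (p, acc)).2 = acc ++ pvGoA e p (l.map (fun xv => xv.2)) := by
  induction l generalizing p acc with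
  | nil => simp [pvGoA]
  | cons hd tl ih => simp [pvGoA, ih]

-- inside a run: A from prev = some v produces the fillers of the run, then continues past it
theorem goA_run (e : Option Int) : ∀ (rest : List Int) (v : Int),
    pvGoA e (some v) rest =
      List.replicate ((rest.takeWhile (fun w => w == v)).length) e ++
        pvRunsB e (rest.drop ((rest.takeWhile (fun w => w == v)).length)) := by
  intro rest
  induction rest with
  | nil =>
    intro v
    unfold pvRunsB
    simp [pvGoA]
  | cons w t ih =>
    intro v
    by_cases h : w = v
    · subst h
      simp only [List.takeWhile, beq_self_eq_true, List.length_cons, List.drop_succ_cons,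
        List.replicate_succ, pvGoA, List.cons_append, if_true]
      rw [ih w]
    · have hb : (w == v) = false := by simp [h]
      simp only [List.takeWhile, hb, List.length_nil, List.replicate_zero, List.drop_zero,
        List.nil_append]
      conv_rhs => unfold pvRunsB
      simp only [pvGoA]
      rw [if_neg (by simp [h])]
      rw [ih w]

-- A from prev = empty_value equals B's run emitter
theorem goA_eq_runsB (e : Option Int) (l : List Int) :
    pvGoA e e l = pvRunsB e l := by
  cases l with
  | nil =>
    unfold pvRunsB
    simp [pvGoA]
  | cons v rest =>
    conv_rhs => unfold pvRunsB
    simp only [pvGoA]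
    congr 1
    · by_cases h : some v = e
      · rw [if_pos h, h]
      · rw [if_neg h]
    · exact goA_run e rest v

-- ===== VERDICT (by name: the statement is the Claim_ definition above) =====
theorem revert_echo_spec : Claim_equal_revert_echo := by
  intro ds e _
  unfold Spec_revert_echo revert_echo revert_echo_alt
  rw [foldlA_eq_goA, List.nil_append, goA_eq_runsB]
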